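-- pv_equiv track=rewrite | github.com/prophecy-io/prophecy-basics | gems/Regex.py | extract_capturing_groups
-- ===== SOURCE A (Python) =====
-- def extract_capturing_groups(pattern):
--     """Extract individual capturing group patterns from a regex string."""
--     if not pattern:
--         return []
--     groups = []
--     i = 0
--     while i < len(pattern):
--         # Check if current character is an opening parenthesis
--         if pattern[i] == '(':
--             # Check if it's escaped
--             if i > 0 and pattern[i-1] == '\\':
--                 i += 1
--                 continue
--
--             # Check if it's a non-capturing group (?:...) or other special groups (?=...), (?!...), etc.
--             if i + 1 < len(pattern) and pattern[i+1] == '?':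
--                 # Find the end of this non-capturing group and skip it
--                 paren_count = 1
--                 j = i + 2  # Skip the '(' and '?'
--                 while j < len(pattern) and paren_count > 0:
--                     # Handle escaped characters
--                     if pattern[j] == '\\' and j + 1 < len(pattern):
--                         j += 2
--                         continue
--                     elif pattern[j] == '(':
--                         paren_count += 1
--                     elif pattern[j] == ')':
--                         paren_count -= 1
--                     j += 1
--                 i = j
--                 continue
--
--             # This is a capturing group - find its end
--             start = i
--             paren_count = 1
--             j = i + 1
--
--             while j < len(pattern) and paren_count > 0:
--                 # Handle escaped characters (skip both the backslash and the next character)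
--                 if pattern[j] == '\\' and j + 1 < len(pattern):
--                     j += 2
--                     continue
--                 elif pattern[j] == '(':
--                     paren_count += 1
--                 elif pattern[j] == ')':
--                     paren_count -= 1
--                 j += 1
--
--             if paren_count == 0:
--                 # Extract the group including the parentheses
--                 group = pattern[start:j]
--                 groups.append(group)
--             i = j
--         else:
--             i += 1
--     return groups
-- ===== SOURCE B (Python) =====
-- def extract_capturing_groups(pattern):
--     """Extract individual capturing group patterns from a regex string."""
--     groups = []
--     depth = 0
--     start = 0
--     capturing = False
--     i = 0
--     n = len(pattern)
--     while i < n: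
--         c = pattern[i]
--         if depth == 0:
--             if c == '(' and not (i > 0 and pattern[i - 1] == '\\'):
--                 depth = 1
--                 start = i
--                 capturing = not (i + 1 < n and pattern[i + 1] == '?')
--             i += 1
--         else:
--             if c == '\\' and i + 1 < n:
--                 i += 2
--             else:
--                 if c == '(':
--                     depth += 1
--                 elif c == ')':
--                     depth -= 1
--                     if depth == 0 and capturing:
--                         groups.append(pattern[start:i + 1])
--                 i += 1
--     return groups
-- ===== Notes on version B (the rewrite author's own statement) =====
-- stated objective: simpler
-- what changed: Replaced A's outer scan with two separate inner bracket-matching while-loops (jumping i past each group) by a single flat pass that maintains a depth counter plus the start index and a capturing flag of the current top-level group.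
import Mathlib
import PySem

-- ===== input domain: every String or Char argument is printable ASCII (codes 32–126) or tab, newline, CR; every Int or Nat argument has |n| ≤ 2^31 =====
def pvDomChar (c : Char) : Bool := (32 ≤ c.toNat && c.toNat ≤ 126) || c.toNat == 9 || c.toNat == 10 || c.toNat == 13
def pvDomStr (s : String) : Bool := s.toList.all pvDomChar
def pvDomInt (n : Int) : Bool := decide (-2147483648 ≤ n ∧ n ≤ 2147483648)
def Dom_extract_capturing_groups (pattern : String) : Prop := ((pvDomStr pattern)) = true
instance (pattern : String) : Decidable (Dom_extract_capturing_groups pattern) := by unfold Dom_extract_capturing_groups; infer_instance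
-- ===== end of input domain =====

-- B replaces A's nested bracket-matching loops by a single flat pass with a depth counter: simpler, same cost.
-- (While loops carry a Nat fuel only to make the recursion structural; fuel = pattern length is provably
-- sufficient, since the scan index strictly increases each iteration and the loops stop at the end.)

-- ===== PORT A =====
-- inner while-loop of A (both the non-capturing skip and the capturing scan use this
-- identical loop body): scan from j with open-paren count cnt; returns (final j, final cnt).
def pvScanA (p : List Char) : Nat → Nat → Nat → Nat × Nat
  | 0, j, cnt => (j, cnt)
  | fuel + 1, j, cnt =>
    if j < p.length ∧ 0 < cnt then
      if p.getD j ' ' = '\\' ∧ j + 1 < p.length then pvScanA p fuel (j + 2) cnt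
      else if p.getD j ' ' = '(' then pvScanA p fuel (j + 1) (cnt + 1)
      else if p.getD j ' ' = ')' then pvScanA p fuel (j + 1) (cnt - 1)
      else pvScanA p fuel (j + 1) cnt
    else (j, cnt)

-- outer while-loop of A
def pvLoopA (p : List Char) : Nat → Nat → List String → List String
  | 0, _, groups => groups
  | fuel + 1, i, groups =>
    if i < p.length then
      if p.getD i ' ' = '(' then
        if 0 < i ∧ p.getD (i - 1) ' ' = '\\' then pvLoopA p fuel (i + 1) groups
        else if i + 1 < p.length ∧ p.getD (i + 1) ' ' = '?' then
          pvLoopA p fuel (pvScanA p p.length (i + 2) 1).1 groups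
        else
          let r := pvScanA p p.length (i + 1) 1
          pvLoopA p fuel r.1
            (if r.2 = 0 then
              groups ++ [String.ofList (PySem.List.slice p (some (i : Int)) (some (r.1 : Int)))]
             else groups)
      else pvLoopA p fuel (i + 1) groups
    else groups

def extract_capturing_groups (pattern : String) : List String :=
  if pattern.toList = [] then [] else pvLoopA pattern.toList pattern.toList.length 0 []

-- ===== PORT B =====
-- B's single flat while-loop: depth counter, start index and capturing flag of the
-- current top-level group.
def pvLoopB (p : List Char) : Nat → Nat → Nat → Nat → Bool → List String → List String
  | 0, _, _, _, _, groups => groups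
  | fuel + 1, i, depth, start, capturing, groups =>
    if i < p.length then
      if depth = 0 then
        if p.getD i ' ' = '(' ∧ ¬ (0 < i ∧ p.getD (i - 1) ' ' = '\\') then
          pvLoopB p fuel (i + 1) 1 i (!(decide (i + 1 < p.length ∧ p.getD (i + 1) ' ' = '?'))) groups
        else pvLoopB p fuel (i + 1) 0 start capturing groups
      else
        if p.getD i ' ' = '\\' ∧ i + 1 < p.length then
          pvLoopB p fuel (i + 2) depth start capturing groups
        else if p.getD i ' ' = '(' then pvLoopB p fuel (i + 1) (depth + 1) start capturing groups
        else if p.getD i ' ' = ')' then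
          pvLoopB p fuel (i + 1) (depth - 1) start capturing
            (if depth - 1 = 0 ∧ capturing then
              groups ++ [String.ofList (PySem.List.slice p (some (start : Int)) (some ((i + 1 : Nat) : Int)))]
             else groups)
        else pvLoopB p fuel (i + 1) depth start capturing groups
    else groups

def extract_capturing_groups_alt (pattern : String) : List String :=
  pvLoopB pattern.toList pattern.toList.length 0 0 0 false []

-- ===== PRECONDITION & SPEC =====
def Spec_extract_capturing_groups (pattern : String) (out : List String) : Prop := out = extract_capturing_groups_alt pattern
instance (pattern : String) (out : List String) : Decidable (Spec_extract_capturing_groups pattern out) := by unfold Spec_extract_capturing_groups; infer_instance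

-- ===== CLAIM (what is proved, stated in full; the proofs are below) =====
def Claim_equal_extract_capturing_groups : Prop := ∀ (pattern : String), Dom_extract_capturing_groups pattern → Spec_extract_capturing_groups pattern (extract_capturing_groups pattern)

-- ===== LEMMAS AND PROOFS =====

-- past the end, the scan is the identity whatever the fuel
theorem pvScanA_exhaust (p : List Char) (f j cnt : Nat) (hj : p.length ≤ j) :
    pvScanA p f j cnt = (j, cnt) := by
  cases f with
  | zero => rfl
  | succ f => rw [pvScanA, if_neg (fun hc => absurd hc.1 (by omega))]

-- any fuel covering the remaining distance gives the same scan result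
theorem pvScanA_fuel (p : List Char) :
    ∀ (f f' j cnt : Nat), p.length - j ≤ f → p.length - j ≤ f' →
      pvScanA p f j cnt = pvScanA p f' j cnt := by
  intro f
  induction f with
  | zero =>
    intro f' j cnt hf hf'
    rw [pvScanA_exhaust p 0 j cnt (by omega), pvScanA_exhaust p f' j cnt (by omega)]
  | succ f ih =>
    intro f' j cnt hf hf'
    by_cases hj : j < p.length
    · obtain ⟨f', rfl⟩ : ∃ g, f' = g + 1 := ⟨f' - 1, by omega⟩
      rw [pvScanA, pvScanA]
      by_cases hc : j < p.length ∧ 0 < cnt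
      · rw [if_pos hc, if_pos hc]
        by_cases h1 : p.getD j ' ' = '\\' ∧ j + 1 < p.length
        · rw [if_pos h1, if_pos h1]; exact ih f' (j + 2) cnt (by omega) (by omega)
        · rw [if_neg h1, if_neg h1]
          by_cases h2 : p.getD j ' ' = '('
          · rw [if_pos h2, if_pos h2]; exact ih f' (j + 1) (cnt + 1) (by omega) (by omega)
          · rw [if_neg h2, if_neg h2]
            by_cases h3 : p.getD j ' ' = ')'
            · rw [if_pos h3, if_pos h3]; exact ih f' (j + 1) (cnt - 1) (by omega) (by omega)
            · rw [if_neg h3, if_neg h3]; exact ih f' (j + 1) cnt (by omega) (by omega)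
      · rw [if_neg hc, if_neg hc]
    · rw [pvScanA_exhaust p (f + 1) j cnt (by omega), pvScanA_exhaust p f' j cnt (by omega)]

-- the scan never moves backwards
theorem pvScanA_ge (p : List Char) :
    ∀ (f j cnt : Nat), j ≤ (pvScanA p f j cnt).1 := by
  intro f
  induction f with
  | zero => intro j cnt; exact Nat.le_refl j
  | succ f ih =>
    intro j cnt
    rw [pvScanA]
    by_cases hc : j < p.length ∧ 0 < cnt
    · rw [if_pos hc]
      by_cases h1 : p.getD j ' ' = '\\' ∧ j + 1 < p.length
      · rw [if_pos h1]; have := ih (j + 2) cnt; omega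
      · rw [if_neg h1]
        by_cases h2 : p.getD j ' ' = '('
        · rw [if_pos h2]; have := ih (j + 1) (cnt + 1); omega
        · rw [if_neg h2]
          by_cases h3 : p.getD j ' ' = ')'
          · rw [if_pos h3]; have := ih (j + 1) (cnt - 1); omega
          · rw [if_neg h3]; have := ih (j + 1) cnt; omega
    · rw [if_neg hc]

-- when the scan exits with a nonzero count it has reached the end of the pattern
theorem pvScanA_stop (p : List Char) :
    ∀ (f j cnt : Nat), p.length - j ≤ f → j ≤ p.length →
      (pvScanA p f j cnt).2 ≠ 0 → (pvScanA p f j cnt).1 = p.length := by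
  intro f
  induction f with
  | zero => intro j cnt hf hj _; rw [pvScanA_exhaust p 0 j cnt (by omega)]; omega
  | succ f ih =>
    intro j cnt hf hj hnz
    rw [pvScanA] at hnz ⊢
    by_cases hc : j < p.length ∧ 0 < cnt
    · rw [if_pos hc] at hnz ⊢
      by_cases h1 : p.getD j ' ' = '\\' ∧ j + 1 < p.length
      · rw [if_pos h1] at hnz ⊢; exact ih (j + 2) cnt (by omega) (by omega) hnz
      · rw [if_neg h1] at hnz ⊢
        by_cases h2 : p.getD j ' ' = '('
        · rw [if_pos h2] at hnz ⊢; exact ih (j + 1) (cnt + 1) (by omega) (by omega) hnz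
        · rw [if_neg h2] at hnz ⊢
          by_cases h3 : p.getD j ' ' = ')'
          · rw [if_pos h3] at hnz ⊢; exact ih (j + 1) (cnt - 1) (by omega) (by omega) hnz
          · rw [if_neg h3] at hnz ⊢; exact ih (j + 1) cnt (by omega) (by omega) hnz
    · rw [if_neg hc] at hnz ⊢
      simp only [ne_eq] at hnz
      simp only []
      omega

-- past the end, A's outer loop is the identity whatever the fuel
theorem pvLoopA_exhaust (p : List Char) (f i : Nat) (acc : List String) (hi : p.length ≤ i) :
    pvLoopA p f i acc = acc := by
  cases f with
  | zero => rfl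
  | succ f => rw [pvLoopA, if_neg (by omega)]

-- past the end, B's loop is the identity whatever the fuel
theorem pvLoopB_exhaust (p : List Char) (f i d s : Nat) (c : Bool) (acc : List String)
    (hi : p.length ≤ i) : pvLoopB p f i d s c acc = acc := by
  cases f with
  | zero => rfl
  | succ f => rw [pvLoopB, if_neg (by omega)]

-- any fuel covering the remaining distance gives the same result for B's loop
theorem pvLoopB_fuel (p : List Char) :
    ∀ (f f' i d s : Nat) (c : Bool) (acc : List String),
      p.length - i ≤ f → p.length - i ≤ f' →
      pvLoopB p f i d s c acc = pvLoopB p f' i d s c acc := by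
  intro f
  induction f with
  | zero =>
    intro f' i d s c acc hf hf'
    rw [pvLoopB_exhaust p 0 i d s c acc (by omega), pvLoopB_exhaust p f' i d s c acc (by omega)]
  | succ f ih =>
    intro f' i d s c acc hf hf'
    by_cases hi : i < p.length
    · obtain ⟨f', rfl⟩ : ∃ g, f' = g + 1 := ⟨f' - 1, by omega⟩
      rw [pvLoopB, pvLoopB, if_pos hi, if_pos hi]
      by_cases hd : d = 0
      · rw [if_pos hd, if_pos hd]
        by_cases h1 : p.getD i ' ' = '(' ∧ ¬ (0 < i ∧ p.getD (i - 1) ' ' = '\\')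
        · rw [if_pos h1, if_pos h1]; exact ih f' (i + 1) 1 i _ acc (by omega) (by omega)
        · rw [if_neg h1, if_neg h1]; exact ih f' (i + 1) 0 s c acc (by omega) (by omega)
      · rw [if_neg hd, if_neg hd]
        by_cases h1 : p.getD i ' ' = '\\' ∧ i + 1 < p.length
        · rw [if_pos h1, if_pos h1]; exact ih f' (i + 2) d s c acc (by omega) (by omega)
        · rw [if_neg h1, if_neg h1]
          by_cases h2 : p.getD i ' ' = '('
          · rw [if_pos h2, if_pos h2]; exact ih f' (i + 1) (d + 1) s c acc (by omega) (by omega)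
          · rw [if_neg h2, if_neg h2]
            by_cases h3 : p.getD i ' ' = ')'
            · rw [if_pos h3, if_pos h3]; exact ih f' (i + 1) (d - 1) s c _ (by omega) (by omega)
            · rw [if_neg h3, if_neg h3]; exact ih f' (i + 1) d s c acc (by omega) (by omega)
    · rw [pvLoopB_exhaust p (f + 1) i d s c acc (by omega),
          pvLoopB_exhaust p f' i d s c acc (by omega)]

-- the scan with zero count is the identity
theorem pvScanA_zero (p : List Char) (f j : Nat) : pvScanA p f j 0 = (j, 0) := by
  cases f with
  | zero => rfl
  | succ f => rw [pvScanA, if_neg (fun hc => absurd hc.2 (by omega))]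

-- inside a group (depth ≥ 1) B's flat loop follows exactly A's inner scan
theorem pvLoopB_inside (p : List Char) :
    ∀ (f j d s : Nat) (c : Bool) (acc : List String), p.length - j ≤ f → 0 < d →
    pvLoopB p f j d s c acc =
      (if (pvScanA p f j d).2 = 0 then
        pvLoopB p f (pvScanA p f j d).1 0 s c
          (if c then
            acc ++ [String.ofList (PySem.List.slice p (some (s : Int)) (some ((pvScanA p f j d).1 : Int)))]
           else acc)
       else acc) := by
  intro f
  induction f with
  | zero =>
    intro j d s c acc hf hd
    rw [pvScanA_exhaust p 0 j d (by omega), pvLoopB_exhaust p 0 j d s c acc (by omega)]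
    rw [if_neg (by omega)]
  | succ f ih =>
    intro j d s c acc hf hd
    by_cases hj : j < p.length
    · by_cases h1 : p.getD j ' ' = '\\' ∧ j + 1 < p.length
      · have hscan : pvScanA p (f + 1) j d = pvScanA p f (j + 2) d := by
          rw [pvScanA, if_pos ⟨hj, hd⟩, if_pos h1]
        rw [hscan, pvLoopB, if_pos hj, if_neg (by omega), if_pos h1]
        rw [ih (j + 2) d s c acc (by omega) hd]
        by_cases hz : (pvScanA p f (j + 2) d).2 = 0
        · rw [if_pos hz, if_pos hz]
          exact pvLoopB_fuel p f (f + 1) _ 0 s c _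
            (by have := pvScanA_ge p f (j + 2) d; omega) (by have := pvScanA_ge p f (j + 2) d; omega)
        · rw [if_neg hz, if_neg hz]
      · by_cases h2 : p.getD j ' ' = '('
        · have hscan : pvScanA p (f + 1) j d = pvScanA p f (j + 1) (d + 1) := by
            rw [pvScanA, if_pos ⟨hj, hd⟩, if_neg h1, if_pos h2]
          rw [hscan, pvLoopB, if_pos hj, if_neg (by omega), if_neg h1, if_pos h2]
          rw [ih (j + 1) (d + 1) s c acc (by omega) (by omega)]
          by_cases hz : (pvScanA p f (j + 1) (d + 1)).2 = 0
          · rw [if_pos hz, if_pos hz]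
            exact pvLoopB_fuel p f (f + 1) _ 0 s c _
              (by have := pvScanA_ge p f (j + 1) (d + 1); omega)
              (by have := pvScanA_ge p f (j + 1) (d + 1); omega)
          · rw [if_neg hz, if_neg hz]
        · by_cases h3 : p.getD j ' ' = ')'
          · have hscan : pvScanA p (f + 1) j d = pvScanA p f (j + 1) (d - 1) := by
              rw [pvScanA, if_pos ⟨hj, hd⟩, if_neg h1, if_neg h2, if_pos h3]
            rw [hscan, pvLoopB, if_pos hj, if_neg (by omega), if_neg h1, if_neg h2, if_pos h3]
            by_cases hd1 : d = 1
            · subst hd1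
              rw [show pvScanA p f (j + 1) (1 - 1) = (j + 1, 0) from pvScanA_zero p f (j + 1)]
              rw [if_pos rfl]
              have hfeq := pvLoopB_fuel p f (f + 1) (j + 1) 0 s c
              cases c
              · rw [if_neg (fun hc => Bool.false_ne_true hc.2), if_neg Bool.false_ne_true]
                exact hfeq acc (by omega) (by omega)
              · rw [if_pos ⟨rfl, rfl⟩, if_pos rfl]
                exact hfeq _ (by omega) (by omega)
            · rw [if_neg (fun hc => absurd hc.1 (by omega))]
              rw [ih (j + 1) (d - 1) s c acc (by omega) (by omega)]
              by_cases hz : (pvScanA p f (j + 1) (d - 1)).2 = 0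
              · rw [if_pos hz, if_pos hz]
                exact pvLoopB_fuel p f (f + 1) _ 0 s c _
                  (by have := pvScanA_ge p f (j + 1) (d - 1); omega)
                  (by have := pvScanA_ge p f (j + 1) (d - 1); omega)
              · rw [if_neg hz, if_neg hz]
          · have hscan : pvScanA p (f + 1) j d = pvScanA p f (j + 1) d := by
              rw [pvScanA, if_pos ⟨hj, hd⟩, if_neg h1, if_neg h2, if_neg h3]
            rw [hscan, pvLoopB, if_pos hj, if_neg (by omega), if_neg h1, if_neg h2, if_neg h3]
            rw [ih (j + 1) d s c acc (by omega) hd]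
            by_cases hz : (pvScanA p f (j + 1) d).2 = 0
            · rw [if_pos hz, if_pos hz]
              exact pvLoopB_fuel p f (f + 1) _ 0 s c _
                (by have := pvScanA_ge p f (j + 1) d; omega)
                (by have := pvScanA_ge p f (j + 1) d; omega)
            · rw [if_neg hz, if_neg hz]
    · rw [pvLoopB_exhaust p (f + 1) j d s c acc (by omega),
          pvScanA_exhaust p (f + 1) j d (by omega)]
      rw [if_neg (by omega)]

-- one step of the scan over the '?' character of a non-capturing group
theorem pvScanA_qmark (p : List Char) (f f' i : Nat)
    (h1 : i + 1 < p.length) (h2 : p.getD (i + 1) ' ' = '?')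
    (hf : p.length - (i + 1) ≤ f) (hf' : p.length - (i + 2) ≤ f') :
    pvScanA p f (i + 1) 1 = pvScanA p f' (i + 2) 1 := by
  obtain ⟨f, rfl⟩ : ∃ g, f = g + 1 := ⟨f - 1, by omega⟩
  rw [pvScanA, if_pos ⟨h1, Nat.one_pos⟩]
  rw [if_neg (fun hc => absurd (h2 ▸ hc.1) (by decide))]
  rw [if_neg (fun hc => absurd (h2 ▸ hc) (by decide))]
  rw [if_neg (fun hc => absurd (h2 ▸ hc) (by decide))]
  exact pvScanA_fuel p f f' (i + 2) 1 (by omega) hf'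

-- at depth 0 B's flat loop equals A's outer loop (start/capturing are irrelevant there)
theorem pvLoopB_eq_loopA (p : List Char) :
    ∀ (fA fB i s : Nat) (c : Bool) (acc : List String),
      p.length - i ≤ fA → p.length - i ≤ fB →
      pvLoopB p fB i 0 s c acc = pvLoopA p fA i acc := by
  intro fA
  induction fA with
  | zero =>
    intro fB i s c acc hfA hfB
    rw [pvLoopA_exhaust p 0 i acc (by omega), pvLoopB_exhaust p fB i 0 s c acc (by omega)]
  | succ fA ih =>
    intro fB i s c acc hfA hfB
    by_cases hi : i < p.length
    · obtain ⟨fB, rfl⟩ : ∃ g, fB = g + 1 := ⟨fB - 1, by omega⟩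
      rw [pvLoopB, if_pos hi, if_pos rfl, pvLoopA, if_pos hi]
      by_cases hop : p.getD i ' ' = '('
      · by_cases hesc : 0 < i ∧ p.getD (i - 1) ' ' = '\\'
        · rw [if_neg (fun hc => hc.2 hesc), if_pos hop, if_pos hesc]
          exact ih fB (i + 1) s c acc (by omega) (by omega)
        · rw [if_pos ⟨hop, hesc⟩, if_pos hop, if_neg hesc]
          rw [pvLoopB_inside p fB (i + 1) 1 i _ acc (by omega) Nat.one_pos]
          by_cases hq : i + 1 < p.length ∧ p.getD (i + 1) ' ' = '?'
          · -- non-capturing group: A skips it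
            rw [if_pos hq, pvScanA_qmark p fB p.length i hq.1 hq.2 (by omega) (by omega)]
            have hcdec : (!decide (i + 1 < p.length ∧ p.getD (i + 1) ' ' = '?')) = false := by
              rw [decide_eq_true hq, Bool.not_true]
            have hge := pvScanA_ge p p.length (i + 2) 1
            by_cases hz : (pvScanA p p.length (i + 2) 1).2 = 0
            · rw [if_pos hz, hcdec, if_neg Bool.false_ne_true]
              exact ih fB _ i false acc (by omega) (by omega)
            · rw [if_neg hz]
              have hlen := pvScanA_stop p p.length (i + 2) 1 (by omega) (by omega) hz
              rw [pvLoopA_exhaust p fA _ acc (by omega)]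
          · -- capturing group
            rw [if_neg hq]
            have hcdec : (!decide (i + 1 < p.length ∧ p.getD (i + 1) ' ' = '?')) = true := by
              rw [decide_eq_false hq, Bool.not_false]
            rw [pvScanA_fuel p fB p.length (i + 1) 1 (by omega) (by omega)]
            have hge := pvScanA_ge p p.length (i + 1) 1
            by_cases hz : (pvScanA p p.length (i + 1) 1).2 = 0
            · simp only [hz, hcdec]
              exact ih fB _ i true _ (by omega) (by omega)
            · simp only [if_neg hz]
              have hlen := pvScanA_stop p p.length (i + 1) 1 (by omega) (by omega) hz
              rw [pvLoopA_exhaust p fA _ _ (by omega)]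
      · rw [if_neg (fun hc => hop hc.1), if_neg hop]
        exact ih fB (i + 1) s c acc (by omega) (by omega)
    · rw [pvLoopA_exhaust p (fA + 1) i acc (by omega),
          pvLoopB_exhaust p fB i 0 s c acc (by omega)]

-- ===== VERDICT (by name: the statement is the Claim_ definition above) =====
theorem extract_capturing_groups_spec : Claim_equal_extract_capturing_groups := by
  intro pattern _
  unfold Spec_extract_capturing_groups extract_capturing_groups extract_capturing_groups_alt
  by_cases he : pattern.toList = []
  · rw [if_pos he, he]; rfl
  · rw [if_neg he,
        pvLoopB_eq_loopA pattern.toList pattern.toList.length pattern.toList.length 0 0 false []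
          (by omega) (by omega)]
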